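-- pv_equiv track=rewrite | github.com/symonline/myvest | project/investment/file_reader.py | __list_cleaner
-- ===== SOURCE A (Python) =====
-- def __list_cleaner(raw_list):
--     # use in selecting & cleaning  needed fields from the extracted
--     # cscs master list
--     all_record = []
--     for field in raw_list:
--         chn, name, address = field[:15].upper(), field[15:55].upper(), field[55:175].upper(),
--         state, email, phone = field[175:200].upper(), field[273:313].upper(), field[313:353].upper()
--         all_record.append([chn.strip(),
--                             name.strip(),
--                             address.strip(),
--                             state.strip(),
--                             email.strip(),
--                             phone.strip()])
--     return all_record
-- ===== SOURCE B (Python) =====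
-- # Stream-peeling re-implementation: uppercase the whole record once, then consume
-- # it left to right as a character buffer, peeling off width-annotated segments
-- # (skipping the unused 200..273 gap) instead of taking six absolute slices.
-- WIDTHS = ((15, True), (40, True), (120, True), (25, True), (73, False), (40, True), (40, True))
--
-- def __list_cleaner(raw_list):
--     def clean(field):
--         chars = list(field.upper())
--         row = []
--         for width, keep in WIDTHS:
--             seg, chars = chars[:width], chars[width:]
--             if keep:
--                 row.append(''.join(seg).strip())
--         return row
--     return [clean(field) for field in raw_list]
-- ===== Notes on version B (the rewrite author's own statement) =====
-- stated objective: alternative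
-- what changed: B uppercases the whole record once and peels fixed-width segments sequentially off a consumed character buffer (with an explicit skip of the unused 200..273 gap), instead of A's six independent absolute slices each uppercased separately.
import Mathlib
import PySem

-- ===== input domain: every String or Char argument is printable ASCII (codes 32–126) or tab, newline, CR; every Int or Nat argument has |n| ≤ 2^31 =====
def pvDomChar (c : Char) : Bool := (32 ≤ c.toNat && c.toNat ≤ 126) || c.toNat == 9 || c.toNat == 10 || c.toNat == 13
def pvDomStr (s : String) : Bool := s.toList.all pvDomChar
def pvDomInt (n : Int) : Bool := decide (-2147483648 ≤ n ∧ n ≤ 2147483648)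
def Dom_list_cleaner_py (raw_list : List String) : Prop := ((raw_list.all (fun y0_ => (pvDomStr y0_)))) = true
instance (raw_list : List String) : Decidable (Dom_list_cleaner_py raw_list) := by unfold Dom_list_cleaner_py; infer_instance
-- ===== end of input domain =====

-- B uppercases each record once and peels width-annotated segments off a consumed character buffer (skipping the 73-char gap), instead of A's six independent absolute slices; objective: alternative decomposition, same cost.


-- ===== PORT A =====
def list_cleaner_py (raw_list : List String) : List (List String) :=
  raw_list.foldl (fun all_record field =>
    let chn := PySem.Str.upper (PySem.Str.slice field none (some 15))
    let name := PySem.Str.upper (PySem.Str.slice field (some 15) (some 55))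
    let address := PySem.Str.upper (PySem.Str.slice field (some 55) (some 175))
    let state := PySem.Str.upper (PySem.Str.slice field (some 175) (some 200))
    let email := PySem.Str.upper (PySem.Str.slice field (some 273) (some 313))
    let phone := PySem.Str.upper (PySem.Str.slice field (some 313) (some 353))
    all_record ++ [[PySem.Str.strip chn, PySem.Str.strip name, PySem.Str.strip address,
                    PySem.Str.strip state, PySem.Str.strip email, PySem.Str.strip phone]]) []

-- ===== PORT B =====
-- width table: segment widths in buffer order; `false` marks the unused 200..273 gap that is skipped
def pvWidths : List (Nat × Bool) :=
  [(15, true), (40, true), (120, true), (25, true), (73, false), (40, true), (40, true)]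

-- peel segments off the character buffer left to right, keeping the flagged ones (stripped)
def pvPeel : List (Nat × Bool) → List Char → List String
  | [], _ => []
  | (w, keep) :: ws, cs =>
      let seg := cs.take w
      let rest := cs.drop w
      if keep then String.ofList (PySem.Chars.strip seg) :: pvPeel ws rest
      else pvPeel ws rest

def list_cleaner_py_alt (raw_list : List String) : List (List String) :=
  raw_list.map (fun field => pvPeel pvWidths (PySem.Str.upper field).toList)

-- ===== PRECONDITION & SPEC =====
def Spec_list_cleaner_py (raw_list : List String) (out : List (List String)) : Prop := out = list_cleaner_py_alt raw_list
instance (raw_list : List String) (out : List (List String)) : Decidable (Spec_list_cleaner_py raw_list out) := by unfold Spec_list_cleaner_py; infer_instance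

-- ===== CLAIM (what is proved, stated in full; the proofs are below) =====
def Claim_equal_list_cleaner_py : Prop := ∀ (raw_list : List String), Dom_list_cleaner_py raw_list → Spec_list_cleaner_py raw_list (list_cleaner_py raw_list)

-- ===== LEMMAS AND PROOFS =====

-- ===== VERDICT (by name: the statement is the Claim_ definition above) =====
theorem list_cleaner_py_spec : Claim_equal_list_cleaner_py := by
  intro raw_list _
  unfold Spec_list_cleaner_py list_cleaner_py list_cleaner_py_alt
  rw [PySem.List.foldl_append_singleton_eq_map]
  apply List.map_congr_left
  intro f _
  simp [pvPeel, pvWidths, PySem.Str.strip, PySem.Str.upper, PySem.Str.slice,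
        PySem.Chars.upper, List.drop_drop]
  refine ⟨?_, ?_, ?_, ?_, ?_, ?_⟩
  · rw [PySem.List.slice_to f.toList (b := 15) (by norm_num)]
    simp [List.map_take]
  · rw [PySem.List.slice_toNat f.toList (a := 15) (b := 55) (by norm_num) (by norm_num)]
    simp [List.map_take, List.map_drop]
  · rw [PySem.List.slice_toNat f.toList (a := 55) (b := 175) (by norm_num) (by norm_num)]
    simp [List.map_take, List.map_drop]
  · rw [PySem.List.slice_toNat f.toList (a := 175) (b := 200) (by norm_num) (by norm_num)]
    simp [List.map_take, List.map_drop]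
  · rw [PySem.List.slice_toNat f.toList (a := 273) (b := 313) (by norm_num) (by norm_num)]
    simp [List.map_take, List.map_drop]
  · rw [PySem.List.slice_toNat f.toList (a := 313) (b := 353) (by norm_num) (by norm_num)]
    simp [List.map_take, List.map_drop]
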